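-- pv_equiv track=rewrite | github.com/Doorcreator/Bookshelf | testfd/ALG018 heap sort.py | extract_min02
-- ===== SOURCE A (Python) =====
-- def extract_min02(heap):
-- # extract the minimum value [top 1 element in this case] in a heap and restore the heap.
--     heap_min = heap[0]
--     t = heap[-1]
--     heap[-1] = heap[0]
--     heap[0] = t
--     heap.pop(-1)
--     n = len(heap)
--     parent_pos = 0
--     while parent_pos <= n//2 - 1:
--         left_child_pos = 2*parent_pos + 1
--         right_child_pos = 2*parent_pos + 2
--         try:
--             current_pos = left_child_pos if heap[left_child_pos]<heap[right_child_pos] else right_child_pos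
--         except IndexError:
--             current_pos = left_child_pos
--         if heap[current_pos] < heap[parent_pos]:
--             t = heap[current_pos]
--             heap[current_pos] = heap[parent_pos]
--             heap[parent_pos] = t
--             parent_pos = current_pos
--         else:
--             break
--     return heap_min,heap
-- ===== SOURCE B (Python) =====
-- def sift_path(rest, v, pos):
--     # path of positions the swapped-up root value v travels along, computed on the
--     # untouched array: children compared at each step are never modified by the sift
--     n = len(rest)
--     left = 2 * pos + 1
--     if left >= n:
--         return [pos]
--     child = left if left + 1 >= n or rest[left] < rest[left + 1] else left + 1
--     if rest[child] < v:
--         return [pos] + sift_path(rest, v, child)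
--     return [pos]
--
-- def extract_min02(heap):
--     heap_min = heap[0]
--     rest = ([heap[-1]] + heap[1:])[:-1]
--     path = sift_path(rest, heap[-1], 0)
--     out = rest[:]
--     for p, c in zip(path, path[1:]):
--         out[p] = rest[c]
--     if rest:
--         out[path[-1]] = rest[0]
--     heap[:] = out
--     return heap_min, heap
-- ===== Notes on version B (the rewrite author's own statement) =====
-- stated objective: alternative
-- what changed: Instead of A's in-place swap loop with try/except for the missing right child, B first computes the sift-down path on the untouched array with a recursive helper, then materializes all deferred writes in one pass over a copy (zip of consecutive path positions), assigning the moved-up value at the path's end.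
import Mathlib
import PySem

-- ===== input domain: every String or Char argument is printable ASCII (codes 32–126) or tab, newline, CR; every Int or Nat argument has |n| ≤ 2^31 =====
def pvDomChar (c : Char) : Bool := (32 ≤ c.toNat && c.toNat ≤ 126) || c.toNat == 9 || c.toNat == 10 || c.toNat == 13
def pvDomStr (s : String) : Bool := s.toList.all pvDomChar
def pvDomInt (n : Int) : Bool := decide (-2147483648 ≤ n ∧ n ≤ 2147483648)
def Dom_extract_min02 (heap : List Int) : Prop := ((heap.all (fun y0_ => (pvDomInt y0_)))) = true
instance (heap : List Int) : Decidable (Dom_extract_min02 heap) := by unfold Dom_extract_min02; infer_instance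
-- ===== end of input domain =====

-- ===== PORT A =====
-- B replaces A's in-place swap loop by a different decomposition: first compute the
-- sift-down path on the untouched array (recursive helper), then materialize the
-- deferred writes in one pass over a copy.  Both Pythons mutate `heap` in place and
-- leave it with the same content; the equivalence proved here is about the returned value.
-- A's in-range accesses heap[i] (index guaranteed in range by the loop guard / Pre_)
-- are ported as List.getD i 0, exact there; the possibly-raising heap[right] is
-- ported with PySem.List.pyGet? (none = IndexError, the except branch).
def siftA (heap : List Int) (parent : Nat) : List Int :=
  let n := heap.length
  if hg : (parent : Int) ≤ PySem.Int.floordiv (n : Int) 2 - 1 then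
    let left := 2 * parent + 1
    let right := 2 * parent + 2
    let current :=
      match PySem.List.pyGet? heap (right : Int) with
      | some hr => if heap.getD left 0 < hr then left else right
      | none => left
    if heap.getD current 0 < heap.getD parent 0 then
      siftA ((heap.set current (heap.getD parent 0)).set parent (heap.getD current 0)) current
    else heap
  else heap
  termination_by heap.length - parent
  decreasing_by
    simp only [List.length_set]
    have hn : n = heap.length := rfl
    rw [PySem.Int.floordiv_eq_ediv_of_pos (by omega : (0:Int) < 2), hn] at hg
    have hl : left = 2 * parent + 1 := rfl
    have hr' : right = 2 * parent + 2 := rfl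
    refine Nat.sub_lt_sub_left (by omega) ?_
    split <;> try split
    all_goals linarith [hl, hr']

def extract_min02 (heap : List Int) : Int × List Int :=
  let heap_min := heap.getD 0 0
  let t := heap.getD (heap.length - 1) 0        -- heap[-1]
  let heap1 := (heap.set (heap.length - 1) heap_min).set 0 t
  let heap2 := heap1.dropLast                   -- heap.pop(-1); heap1 nonempty under Pre_
  (heap_min, siftA heap2 0)

-- ===== PORT B =====
-- sift_path: positions the swapped-up value v travels along, on the untouched array
-- (Python's left and left+1 are inlined as 2*pos+1 and 2*pos+2).
def pathB (rest : List Int) (v : Int) (pos : Nat) : List Nat :=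
  if _h : 2 * pos + 1 < rest.length then
    let child := if rest.length ≤ 2 * pos + 2 ∨ rest.getD (2 * pos + 1) 0 < rest.getD (2 * pos + 2) 0 then 2 * pos + 1 else 2 * pos + 2
    if rest.getD child 0 < v then [pos] ++ pathB rest v child else [pos]
  else [pos]
  termination_by rest.length - pos
  decreasing_by
    refine Nat.sub_lt_sub_left (by omega) ?_
    split
    all_goals omega

-- slices: heap[1:] = drop 1, xs[:-1] = dropLast, rest[:] copy = rest (lists are values here)
def extract_min02_alt (heap : List Int) : Int × List Int :=
  let heap_min := heap.getD 0 0
  let rest := (heap.getD (heap.length - 1) 0 :: heap.drop 1).dropLast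
  let path := pathB rest (heap.getD (heap.length - 1) 0) 0
  let out := (path.zip (path.drop 1)).foldl (fun o pc => o.set pc.1 (rest.getD pc.2 0)) rest
  let out2 := if rest ≠ [] then out.set (path.getLast?.getD 0) (rest.getD 0 0) else out
  (heap_min, out2)

-- ===== PRECONDITION & SPEC =====
-- A raises IndexError on the empty list (heap[0]); so does B.
def Pre_extract_min02 (heap : List Int) : Prop := heap ≠ []
instance (heap : List Int) : Decidable (Pre_extract_min02 heap) := by unfold Pre_extract_min02; infer_instance
def pvWitness_extract_min02 : List Int := [1, 3, 2]
def Spec_extract_min02 (heap : List Int) (out : Int × List Int) : Prop := out = extract_min02_alt heap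
instance (heap : List Int) (out : Int × List Int) : Decidable (Spec_extract_min02 heap out) := by unfold Spec_extract_min02; infer_instance

-- ===== CLAIM (what is proved, stated in full; the proofs are below) =====
def Claim_equal_extract_min02 : Prop := ∀ (heap : List Int), Dom_extract_min02 heap → Pre_extract_min02 heap → Spec_extract_min02 heap (extract_min02 heap)

-- ===== LEMMAS AND PROOFS =====

-- proof-side helper: apply the deferred writes of a path one by one (mirrors siftA's swaps)
def applyPath (h g : List Int) (v : Int) : List Nat → List Int
  | [] => h
  | [p] => h.set p v
  | p :: c :: t => applyPath (h.set p (g.getD c 0)) g v (c :: t)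

theorem pathB_head (g : List Int) (v : Int) (pos : Nat) :
    ∃ t, pathB g v pos = pos :: t := by
  rw [pathB]
  dsimp only
  split
  · split <;> split <;> exact ⟨_, rfl⟩
  · exact ⟨_, rfl⟩

theorem getD_set_ne (l : List Int) (i j : Nat) (a : Int) (h : i ≠ j) :
    (l.set i a).getD j 0 = l.getD j 0 := by
  simp [List.getD, List.getElem?_set_ne h]

theorem getD_set_self (l : List Int) (j : Nat) (a : Int) (h : j < l.length) :
    (l.set j a).getD j 0 = a := by
  simp [List.getD, h]

theorem set_getD_self (l : List Int) (i : Nat) : l.set i (l.getD i 0) = l := by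
  by_cases hi : i < l.length
  · apply List.ext_getElem (by simp)
    intro j hj hj'
    rw [List.getElem_set]
    split
    · subst j; rw [List.getD_eq_getElem l 0 hi]
    · rfl
  · exact List.set_eq_of_length_le (by omega)

theorem applyPath_set_head (l g : List Int) (v x : Int) (c : Nat) (t : List Nat) :
    applyPath (l.set c x) g v (c :: t) = applyPath l g v (c :: t) := by
  cases t <;> simp [applyPath, List.set_set]

theorem dropLast_set_last (l : List Int) (a : Int) :
    (l.set (l.length - 1) a).dropLast = l.dropLast := by
  apply List.ext_getElem (by simp)
  intro j hj hj'
  simp only [List.getElem_dropLast, List.getElem_set]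
  rw [if_neg]
  simp [List.length_dropLast] at hj
  omega

-- The central lemma: A's in-place sift-down on h equals B's deferred writes along the
-- path, provided h agrees with the reference array g above pos and carries v at pos.
theorem siftA_eq_applyPath (g : List Int) (v : Int) :
    ∀ h pos, h.length = g.length → h.getD pos 0 = v →
      (∀ j, pos < j → h.getD j 0 = g.getD j 0) →
      siftA h pos = applyPath h g v (pathB g v pos) := by
  intro h pos
  induction h, pos using siftA.induct with
  | case1 heap parent n hle left right current hlt ih =>
    intro hlen hv hup
    have hle' : 2 * parent + 1 < heap.length := by
      have hn : n = heap.length := rfl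
      rw [PySem.Int.floordiv_eq_ediv_of_pos (by omega : (0:Int) < 2), hn] at hle
      omega
    -- A's child choice, characterized in B's form over the reference array g
    have hcC : current = (if g.length ≤ 2*parent+2 ∨ g.getD (2*parent+1) 0 < g.getD (2*parent+2) 0 then 2*parent+1 else 2*parent+2) := by
      have hc : current = (match PySem.List.pyGet? heap (((2*parent+2 : Nat)):Int) with
        | some hr => if _h : heap.getD (2*parent+1) 0 < hr then 2*parent+1 else 2*parent+2
        | none => 2*parent+1) := rfl
      rw [hc]
      rcases hget : PySem.List.pyGet? heap (((2*parent+2 : Nat)):Int) with _|hr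
      · have hout : heap.length ≤ 2*parent+2 := by
          by_contra hcon
          rw [PySem.List.pyGet?_natCast, List.getElem?_eq_getElem (by omega : 2*parent+2 < heap.length)] at hget
          simp at hget
        simp [hout, ← hlen]
      · have hr_lt : 2*parent+2 < heap.length := by
          by_contra hcon
          rw [PySem.List.pyGet?_natCast, List.getElem?_eq_none_iff.mpr (by omega)] at hget
          simp at hget
        rw [PySem.List.pyGet?_natCast, List.getElem?_eq_getElem hr_lt] at hget
        obtain rfl : hr = heap[2*parent+2] := by injection hget with h; omega
        have hnle : ¬ g.length ≤ 2*parent+2 := by omega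
        have h1 : heap.getD (2*parent+1) 0 = g.getD (2*parent+1) 0 := hup _ (by omega)
        have h2 : heap[2*parent+2] = g.getD (2*parent+2) 0 := by
          rw [← List.getD_eq_getElem heap 0 hr_lt]; exact hup _ (by omega)
        simp only [hnle, false_or, h1, h2]
        split <;> rfl
    have hcur_lt : current < heap.length := by rw [hcC]; split <;> omega
    have hcur_gt : parent < current := by rw [hcC]; split <;> omega
    have hcond : g.getD current 0 < v := by
      rw [← hup current hcur_gt, ← hv]; exact hlt
    -- pathB takes the matching step
    have hpath : pathB g v parent = parent :: pathB g v current := by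
      rw [pathB]
      dsimp only
      rw [dif_pos (by omega : 2 * parent + 1 < g.length), ← hcC, if_pos hcond]
      rfl
    -- the swapped list, rewritten with g-values
    have hswap : (heap.set current (heap.getD parent 0)).set parent (heap.getD current 0)
        = (heap.set parent (g.getD current 0)).set current v := by
      rw [hv, hup current hcur_gt, List.set_comm _ _ (by omega : current ≠ parent)]
    rw [siftA, dif_pos hle]
    show (if heap.getD current 0 < heap.getD parent 0 then
        siftA ((heap.set current (heap.getD parent 0)).set parent (heap.getD current 0)) current
      else heap) = applyPath heap g v (pathB g v parent)
    rw [if_pos hlt, hswap, hpath]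
    obtain ⟨t, ht⟩ := pathB_head g v current
    have hih := ih (by simpa using hlen)
      (by rw [getD_set_ne _ _ _ _ (by omega : parent ≠ current), getD_set_self _ _ _ hcur_lt, hv])
      (by
        intro j hj
        rw [getD_set_ne _ _ _ _ (by omega), getD_set_ne _ _ _ _ (by omega)]
        exact hup j (by omega))
    rw [hswap] at hih
    rw [hih, ht, applyPath_set_head]
    rfl
  | case2 heap parent n hle left right current hnlt =>
    intro hlen hv hup
    have hle' : 2 * parent + 1 < heap.length := by
      have hn : n = heap.length := rfl
      rw [PySem.Int.floordiv_eq_ediv_of_pos (by omega : (0:Int) < 2), hn] at hle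
      omega
    have hcC : current = (if g.length ≤ 2*parent+2 ∨ g.getD (2*parent+1) 0 < g.getD (2*parent+2) 0 then 2*parent+1 else 2*parent+2) := by
      have hc : current = (match PySem.List.pyGet? heap (((2*parent+2 : Nat)):Int) with
        | some hr => if _h : heap.getD (2*parent+1) 0 < hr then 2*parent+1 else 2*parent+2
        | none => 2*parent+1) := rfl
      rw [hc]
      rcases hget : PySem.List.pyGet? heap (((2*parent+2 : Nat)):Int) with _|hr
      · have hout : heap.length ≤ 2*parent+2 := by
          by_contra hcon
          rw [PySem.List.pyGet?_natCast, List.getElem?_eq_getElem (by omega : 2*parent+2 < heap.length)] at hget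
          simp at hget
        simp [hout, ← hlen]
      · have hr_lt : 2*parent+2 < heap.length := by
          by_contra hcon
          rw [PySem.List.pyGet?_natCast, List.getElem?_eq_none_iff.mpr (by omega)] at hget
          simp at hget
        rw [PySem.List.pyGet?_natCast, List.getElem?_eq_getElem hr_lt] at hget
        obtain rfl : hr = heap[2*parent+2] := by injection hget with h; omega
        have hnle : ¬ g.length ≤ 2*parent+2 := by omega
        have h1 : heap.getD (2*parent+1) 0 = g.getD (2*parent+1) 0 := hup _ (by omega)
        have h2 : heap[2*parent+2] = g.getD (2*parent+2) 0 := by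
          rw [← List.getD_eq_getElem heap 0 hr_lt]; exact hup _ (by omega)
        simp only [hnle, false_or, h1, h2]
        split <;> rfl
    have hcur_gt : parent < current := by rw [hcC]; split <;> omega
    have hcond : ¬ g.getD current 0 < v := by
      rw [← hup current hcur_gt, ← hv]; exact hnlt
    have hpath : pathB g v parent = [parent] := by
      rw [pathB]
      dsimp only
      rw [dif_pos (by omega : 2 * parent + 1 < g.length), ← hcC, if_neg hcond]
    rw [siftA, dif_pos hle]
    show (if heap.getD current 0 < heap.getD parent 0 then
        siftA ((heap.set current (heap.getD parent 0)).set parent (heap.getD current 0)) current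
      else heap) = applyPath heap g v (pathB g v parent)
    rw [if_neg hnlt, hpath]
    show heap = heap.set parent v
    rw [← hv, set_getD_self]
  | case3 heap parent n hgt =>
    intro hlen hv hup
    have hg : ¬ (2 * parent + 1 < g.length) := by
      have hn : n = heap.length := rfl
      rw [PySem.Int.floordiv_eq_ediv_of_pos (by omega : (0:Int) < 2), hn] at hgt
      omega
    rw [siftA, dif_neg hgt, pathB]
    dsimp only
    rw [dif_neg hg]
    show heap = heap.set parent v
    rw [← hv, set_getD_self]

-- B's fold over the zipped path plus the final write equals the deferred-write recursion.
theorem applyPath_eq_fold (g : List Int) (v : Int) :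
    ∀ (P : List Nat) (h : List Int), P ≠ [] →
      applyPath h g v P
        = ((P.zip (P.drop 1)).foldl (fun o pc => o.set pc.1 (g.getD pc.2 0)) h).set (P.getLast?.getD 0) v := by
  intro P
  induction P with
  | nil => intro h hne; exact absurd rfl hne
  | cons p t iht =>
    intro h _
    cases t with
    | nil => simp [applyPath]
    | cons c t' =>
      have := iht (h.set p (g.getD c 0)) (by simp)
      simpa [applyPath, List.zip, List.getLast?_cons_cons] using this

-- The two swap-and-pop preambles build the same working array.
theorem preamble_eq (heap : List Int) (hne : heap ≠ []) :
    ((heap.set (heap.length - 1) (heap.getD 0 0)).set 0 (heap.getD (heap.length - 1) 0)).dropLast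
      = (heap.getD (heap.length - 1) 0 :: heap.drop 1).dropLast := by
  rcases heap with _ | ⟨x, xs⟩
  · exact absurd rfl hne
  rcases xs with _ | ⟨y, ys⟩
  · simp
  have hcomm : ((x :: y :: ys).set ((x :: y :: ys).length - 1) ((x :: y :: ys).getD 0 0)).set 0 ((x :: y :: ys).getD ((x :: y :: ys).length - 1) 0)
      = (((x :: y :: ys).set 0 ((x :: y :: ys).getD ((x :: y :: ys).length - 1) 0)).set (((x :: y :: ys).set 0 ((x :: y :: ys).getD ((x :: y :: ys).length - 1) 0)).length - 1) ((x :: y :: ys).getD 0 0)) := by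
    rw [List.set_comm _ _ (by simp : (x :: y :: ys).length - 1 ≠ 0)]
    simp
  rw [hcomm, dropLast_set_last]
  simp [List.set_cons_zero]

-- ===== VERDICT (by name: the statement is the Claim_ definition above) =====
theorem extract_min02_spec : Claim_equal_extract_min02 := by
  intro heap _ hpre
  show _ = extract_min02_alt heap
  simp only [extract_min02, extract_min02_alt]
  rw [preamble_eq heap hpre]
  set t := heap.getD (heap.length - 1) 0 with ht
  set rest := (t :: heap.drop 1).dropLast with hrest
  rcases hr : rest with _ | ⟨r0, rtl⟩
  · -- singleton heap: empty working array on both sides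
    rw [siftA, pathB]
    norm_num
  · -- nonempty working array: rest[0] is the moved-up last element t
    have hr0 : r0 = t := by
      rcases heap with _ | ⟨x, xs⟩
      · exact absurd rfl hpre
      rcases xs with _ | ⟨y, ys⟩
      · simp [hrest] at hr
      · simp [hrest] at hr; exact hr.1.symm
    have hne : rest ≠ [] := by rw [hr]; simp
    have hv : rest.getD 0 0 = t := by rw [hr, hr0]; rfl
    rw [← hr]
    rw [siftA_eq_applyPath rest t rest 0 rfl hv (fun j _ => rfl)]
    rw [applyPath_eq_fold rest t _ rest (by obtain ⟨u, hu⟩ := pathB_head rest t 0; rw [hu]; simp)]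
    rw [if_pos hne, hv]
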